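-- pv_equiv track=rewrite | github.com/wesleymaya/pythonLabs | lab6_WesleyMaya.py | sum_5_consecutive2
-- ===== SOURCE A (Python) =====
-- def sum_5_consecutive2(n):
--
--     i = 0
--     while i in range(len(n)-4):
--         sum1 = n[i] + n[i+1] + n[i+2] + n[i+3] + n[i+4]
--         if sum1 == 0:
--             return True
--
--         else:
--             i += 1
--
--     return False
-- ===== SOURCE B (Python) =====
-- def sum_5_consecutive2(n):
--     P = [0]
--     for x in n:
--         P.append(P[-1] + x)
--     for i in range(len(n) - 4):
--         if P[i + 5] - P[i] == 0:
--             return True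
--     return False
-- ===== Notes on version B (the rewrite author's own statement) =====
-- stated objective: faster
-- what changed: Replaces the while-loop that recomputes each 5-term window sum from scratch with a prefix-sum table built in one pass, testing each window by a single subtraction P[i+5]-P[i].
import Mathlib
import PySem

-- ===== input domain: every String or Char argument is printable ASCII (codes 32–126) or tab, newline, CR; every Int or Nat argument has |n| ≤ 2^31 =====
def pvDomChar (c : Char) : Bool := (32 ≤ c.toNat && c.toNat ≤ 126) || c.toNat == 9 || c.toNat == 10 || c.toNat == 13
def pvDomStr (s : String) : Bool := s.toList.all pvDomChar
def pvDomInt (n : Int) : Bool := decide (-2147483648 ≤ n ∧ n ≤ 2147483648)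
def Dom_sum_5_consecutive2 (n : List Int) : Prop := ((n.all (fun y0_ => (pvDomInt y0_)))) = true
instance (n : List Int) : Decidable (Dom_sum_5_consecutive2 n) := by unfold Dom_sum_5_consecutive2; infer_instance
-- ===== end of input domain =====

-- B replaces A's per-window 5-term re-summation with a prefix-sum table and one subtraction per window (alternative decomposition).

-- ===== PORT A =====
-- the while-loop of A: i advances by 1 while i < len(n)-4, early-returning True when the window sums to 0
def pvALoop (n : List Int) (i : Nat) : Bool :=
  if h : i < n.length - 4 then
    let sum1 := PySem.List.pyGetD n (i : Int) 0 + PySem.List.pyGetD n ((i : Int) + 1) 0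
      + PySem.List.pyGetD n ((i : Int) + 2) 0 + PySem.List.pyGetD n ((i : Int) + 3) 0
      + PySem.List.pyGetD n ((i : Int) + 4) 0
    if sum1 == 0 then true else pvALoop n (i + 1)
  else false
termination_by n.length - 4 - i

def sum_5_consecutive2 (n : List Int) : Bool := pvALoop n 0

-- ===== PORT B =====
-- P = [0]; for x in n: P.append(P[-1] + x)
def pvBuildP (n : List Int) : List Int :=
  n.foldl (fun P x => P ++ [PySem.List.pyGetD P (-1) 0 + x]) [0]

def sum_5_consecutive2_alt (n : List Int) : Bool :=
  let P := pvBuildP n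
  (PySem.List.pyRange 0 ((n.length : Int) - 4) 1).any
    (fun i => PySem.List.pyGetD P (i + 5) 0 - PySem.List.pyGetD P i 0 == 0)

-- ===== PRECONDITION & SPEC =====
def Spec_sum_5_consecutive2 (n : List Int) (out : Bool) : Prop := out = sum_5_consecutive2_alt n
instance (n : List Int) (out : Bool) : Decidable (Spec_sum_5_consecutive2 n out) := by unfold Spec_sum_5_consecutive2; infer_instance

-- ===== CLAIM (what is proved, stated in full; the proofs are below) =====
def Claim_equal_sum_5_consecutive2 : Prop := ∀ (n : List Int), Dom_sum_5_consecutive2 n → Spec_sum_5_consecutive2 n (sum_5_consecutive2 n)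

-- ===== LEMMAS AND PROOFS =====

-- running prefix sums starting from s
def pvPsums (s : Int) : List Int → List Int
  | [] => []
  | x :: t => (s + x) :: pvPsums (s + x) t

theorem pvFoldl_build (l : List Int) (acc : List Int) (h : acc ≠ []) :
    l.foldl (fun P x => P ++ [PySem.List.pyGetD P (-1) 0 + x]) acc
      = acc ++ pvPsums (acc.getLast h) l := by
  induction l generalizing acc with
  | nil => simp [pvPsums]
  | cons x t ih =>
    simp only [List.foldl_cons]
    rw [PySem.List.pyGetD_neg_one acc 0 h]
    rw [ih (acc ++ [acc.getLast h + x]) (by simp)]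
    simp [pvPsums]

theorem pvBuildP_eq (n : List Int) : pvBuildP n = 0 :: pvPsums 0 n := by
  unfold pvBuildP
  rw [pvFoldl_build n [0] (by simp)]
  simp

theorem pvPsums_getD (s : Int) (l : List Int) (k : Nat) (hk : k < l.length) :
    (pvPsums s l).getD k 0 = s + (l.take (k + 1)).sum := by
  induction l generalizing s k with
  | nil => simp at hk
  | cons x t ih =>
    cases k with
    | zero => simp [pvPsums]
    | succ m =>
      simp only [pvPsums, List.getD_cons_succ, List.take_succ_cons, List.sum_cons]
      rw [ih (s + x) m (by simpa using hk)]
      ring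

theorem pvP_getD (n : List Int) (j : Nat) (hj : j ≤ n.length) :
    (pvBuildP n).getD j 0 = (n.take j).sum := by
  rw [pvBuildP_eq]
  cases j with
  | zero => simp
  | succ m =>
    simp only [List.getD_cons_succ]
    rw [pvPsums_getD 0 n m (by omega)]
    simp

theorem pvWindow_sum (n : List Int) (j : Nat) (hj : j + 5 ≤ n.length) :
    (n.take (j + 5)).sum - (n.take j).sum
      = n.getD j 0 + n.getD (j + 1) 0 + n.getD (j + 2) 0 + n.getD (j + 3) 0 + n.getD (j + 4) 0 := by
  have h5 : (5 : Nat) ≤ (n.drop j).length := by simp; omega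
  have htake : n.take (j + 5) = n.take j ++ (n.drop j).take 5 := by
    rw [← List.take_add]
  rw [htake, List.sum_append]
  rw [List.drop_eq_getElem_cons (show j < n.length by omega),
      List.drop_eq_getElem_cons (show j + 1 < n.length by omega),
      List.drop_eq_getElem_cons (show j + 2 < n.length by omega),
      List.drop_eq_getElem_cons (show j + 3 < n.length by omega),
      List.drop_eq_getElem_cons (show j + 4 < n.length by omega)]
  simp only [List.take_succ_cons, List.take_zero, List.sum_cons, List.sum_nil]
  have g : ∀ k : Nat, (hk : k < n.length) → n.getD k 0 = n[k]'hk := by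
    intro k hk; simp [List.getD_eq_getElem?_getD, List.getElem?_eq_getElem hk]
  rw [g j (by omega), g (j+1) (by omega), g (j+2) (by omega), g (j+3) (by omega), g (j+4) (by omega)]
  ring

-- the window test A performs at index j, as a Bool
def pvWin (n : List Int) (j : Nat) : Bool :=
  PySem.List.pyGetD n (j : Int) 0 + PySem.List.pyGetD n ((j : Int) + 1) 0
    + PySem.List.pyGetD n ((j : Int) + 2) 0 + PySem.List.pyGetD n ((j : Int) + 3) 0
    + PySem.List.pyGetD n ((j : Int) + 4) 0 == 0

theorem pvALoop_eq_any (n : List Int) (i : Nat) :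
    pvALoop n i = (List.range' i (n.length - 4 - i)).any (pvWin n) := by
  by_cases h : i < n.length - 4
  · have hc : n.length - 4 - i = (n.length - 4 - (i + 1)) + 1 := by omega
    rw [hc, List.range'_succ, List.any_cons]
    rw [pvALoop, dif_pos h]
    show (if pvWin n i = true then true else pvALoop n (i + 1))
        = (pvWin n i || (List.range' (i + 1) (n.length - 4 - (i + 1))).any (pvWin n))
    cases hwin : pvWin n i with
    | true => simp
    | false => simp [pvALoop_eq_any n (i + 1)]
  · rw [pvALoop]
    have hz : n.length - 4 - i = 0 := by omega
    simp [h, hz]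
termination_by n.length - 4 - i

-- ===== VERDICT (by name: the statement is the Claim_ definition above) =====
theorem sum_5_consecutive2_spec : Claim_equal_sum_5_consecutive2 := by
  intro n _
  unfold Spec_sum_5_consecutive2 sum_5_consecutive2 sum_5_consecutive2_alt
  rw [pvALoop_eq_any]
  rw [PySem.List.pyRange_one, List.any_map]
  have hlen : ((n.length : Int) - 4 - 0).toNat = n.length - 4 := by omega
  rw [hlen, Nat.sub_zero, ← List.range_eq_range']
  apply PySem.List.any_congr_mem
  intro j hj
  simp only [List.mem_range] at hj
  have hj5 : j + 5 ≤ n.length := by omega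
  simp only [Function.comp_apply, pvWin, zero_add]
  have e2 : ((j : Int) + 5) = ((j + 5 : Nat) : Int) := by push_cast; ring
  rw [e2]
  simp only [PySem.List.pyGetD_natCast]
  rw [pvP_getD n (j + 5) hj5, pvP_getD n j (by omega)]
  rw [pvWindow_sum n j hj5]
  have c1 : ((j : Int) + 1) = ((j + 1 : Nat) : Int) := by push_cast; ring
  have c2 : ((j : Int) + 2) = ((j + 2 : Nat) : Int) := by push_cast; ring
  have c3 : ((j : Int) + 3) = ((j + 3 : Nat) : Int) := by push_cast; ring
  have c4 : ((j : Int) + 4) = ((j + 4 : Nat) : Int) := by push_cast; ring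
  rw [c1, c2, c3, c4]
  simp only [PySem.List.pyGetD_natCast]
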